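-- pv_equiv track=rewrite | github.com/ghoudiy/App_collection | Competitive_Programming/Python/Random_Problems/Elzero_Challenges/Add_Commas_Underscore.py | add_commas_and_underscore
-- ===== SOURCE A (Python) =====
-- def add_commas_and_underscore(num):
-- 	num = str(num)
--
-- 	if len(num) >= 4:
-- 		num = num[:-3] + "_" + num[-3:]
-- 	if len(num) > 6:
-- 		i = len(num) - 5
-- 		while len(num[:i]) >= 3:
-- 			i -= 3
-- 			num = num[:i+1] + "," + num[i+1:]
--
-- 		return num
--
-- 	return num
-- ===== SOURCE B (Python) =====
-- def add_commas_and_underscore(num):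
--     s = str(num)
--     chunks = []
--     i = len(s)
--     while i > 0:
--         chunks.append(s[max(0, i - 3):i])
--         i -= 3
--     chunks.reverse()
--     if len(chunks) <= 1:
--         return s
--     return ",".join(chunks[:-1]) + "_" + chunks[-1]
-- ===== Notes on version B (the rewrite author's own statement) =====
-- stated objective: simpler
-- what changed: B builds the three-character groups of str(num) from the right in one pass and joins them (comma between upper groups, underscore before the last group), instead of A's two-phase in-place separator insertion by index arithmetic with a while loop of repeated slicing-and-reconcatenation.
import Mathlib
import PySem

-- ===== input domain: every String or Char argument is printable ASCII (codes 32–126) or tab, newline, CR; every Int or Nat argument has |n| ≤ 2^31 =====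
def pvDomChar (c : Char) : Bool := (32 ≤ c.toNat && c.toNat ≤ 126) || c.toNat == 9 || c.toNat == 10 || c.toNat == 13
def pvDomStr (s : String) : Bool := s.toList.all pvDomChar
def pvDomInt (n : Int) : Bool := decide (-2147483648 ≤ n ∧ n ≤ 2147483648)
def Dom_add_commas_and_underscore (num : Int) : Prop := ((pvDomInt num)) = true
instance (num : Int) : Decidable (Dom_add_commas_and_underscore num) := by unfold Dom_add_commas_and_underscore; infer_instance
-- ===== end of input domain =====

-- B re-decomposes A: it builds the three-char groups from the right in one pass and joins them
-- (',' between upper groups, '_' before the last), instead of A's in-place separator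
-- insertions by index arithmetic; objective: simpler (same cost).

-- ===== PORT A =====
-- A's while loop; the fuel only makes the Python 'while' total (the caller passes enough)
def pvACommaLoop (fuel : Nat) (num : List Char) (i : Int) : List Char :=
  match fuel with
  | 0 => num
  | fuel + 1 =>
    if 3 ≤ (PySem.List.slice num none (some i)).length then
      pvACommaLoop fuel
        (PySem.List.slice num none (some (i - 3 + 1)) ++ ',' :: PySem.List.slice num (some (i - 3 + 1)) none)
        (i - 3)
    else num

def pvAchars (s : List Char) : List Char :=
  let num := if 4 ≤ s.length then
      PySem.List.slice s none (some (-3)) ++ '_' :: PySem.List.slice s (some (-3)) none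
    else s
  if 6 < num.length then pvACommaLoop num.length num (PySem.List.len num - 5)
  else num

def add_commas_and_underscore (num : Int) : String :=
  String.ofList (pvAchars (PySem.Int.toChars num))

-- ===== PORT B =====
-- B's while loop collecting s[max(0,i-3):i]; the fuel only makes the 'while' total
def pvBChunkLoop (fuel : Nat) (s : List Char) (i : Int) (chunks : List (List Char)) : List (List Char) :=
  match fuel with
  | 0 => chunks
  | fuel + 1 =>
    if 0 < i then
      pvBChunkLoop fuel s (i - 3) (chunks ++ [PySem.List.slice s (some (max 0 (i - 3))) (some i)])
    else chunks

def pvBchars (s : List Char) : List Char :=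
  let chunks := (pvBChunkLoop (s.length + 1) s (PySem.List.len s) []).reverse
  if chunks.length ≤ 1 then s
  else
    PySem.Chars.join [','] (PySem.List.slice chunks none (some (-1)))
      ++ '_' :: PySem.List.pyGetD chunks (-1) []

def add_commas_and_underscore_alt (num : Int) : String :=
  String.ofList (pvBchars (PySem.Int.toChars num))

-- ===== PRECONDITION & SPEC =====
def Spec_add_commas_and_underscore (num : Int) (out : String) : Prop := out = add_commas_and_underscore_alt num
instance (num : Int) (out : String) : Decidable (Spec_add_commas_and_underscore num out) := by unfold Spec_add_commas_and_underscore; infer_instance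

-- ===== CLAIM (what is proved, stated in full; the proofs are below) =====
def Claim_equal_add_commas_and_underscore : Prop := ∀ (num : Int), Dom_add_commas_and_underscore num → Spec_add_commas_and_underscore num (add_commas_and_underscore num)

-- ===== LEMMAS AND PROOFS =====

-- t with ',' inserted every 3 characters from the right (the common value of both pipelines' upper part)
def pvComm (t : List Char) : List Char :=
  if _h : 4 ≤ t.length then pvComm (t.take (t.length - 3)) ++ ',' :: t.drop (t.length - 3) else t
termination_by t.length
decreasing_by simp; omega

-- the 3-char groups of s, rightmost group first
def pvGrps (s : List Char) : List (List Char) :=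
  if h : s = [] then []
  else s.drop (s.length - 3) :: pvGrps (s.take (s.length - 3))
termination_by s.length
decreasing_by have := List.length_pos_of_ne_nil h; simp; omega

lemma pvGrps_ne_nil {s : List Char} (h : s ≠ []) : pvGrps s ≠ [] := by
  rw [pvGrps]; simp [h]

lemma pvGrps_small (s : List Char) (h : s ≠ []) (h3 : s.length ≤ 3) : pvGrps s = [s] := by
  rw [pvGrps]
  simp only [dif_neg h]
  have h0 : s.length - 3 = 0 := by omega
  rw [h0]
  simp [pvGrps]

lemma pvLast (gs : List (List Char)) (g : List Char) :
    PySem.List.pyGetD (gs ++ [g]) (-1) [] = g := by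
  rw [PySem.List.pyGetD_neg_ofNat (gs ++ [g]) 1 [] (by omega) (by simp)]
  simp

lemma pvALoop_eq : ∀ (fuel : Nat) (t rest : List Char), 1 ≤ t.length → t.length ≤ 3 * fuel + 3 →
    pvACommaLoop fuel (t ++ rest) ((t.length : Int) - 1) = pvComm t ++ rest := by
  intro fuel
  induction fuel with
  | zero =>
    intro t rest h1 h2
    rw [pvACommaLoop, pvComm]
    simp only [dif_neg (by omega : ¬ 4 ≤ t.length)]
  | succ fuel ih =>
    intro t rest h1 h2
    rw [pvACommaLoop]
    rw [PySem.List.slice_to (t ++ rest) (by omega : (0:Int) ≤ (t.length : Int) - 1)]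
    have htn : ((t.length : Int) - 1).toNat = t.length - 1 := by omega
    rw [htn]
    have hmin : (List.take (t.length - 1) (t ++ rest)).length = t.length - 1 := by
      simp [List.length_take, List.length_append]; omega
    by_cases h4 : 4 ≤ t.length
    · rw [if_pos (by omega)]
      have hidx : (t.length : Int) - 1 - 3 + 1 = ((t.length - 3 : Nat) : Int) := by omega
      rw [hidx, PySem.List.slice_to_natCast, PySem.List.slice_from_natCast,
          List.take_append_of_le_length (by omega),
          List.drop_append_of_le_length (by omega)]
      have hlen' : (t.take (t.length - 3)).length = t.length - 3 := by
        simp [List.length_take]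
      have hcast : (t.length : Int) - 1 - 3 = ((t.take (t.length - 3)).length : Int) - 1 := by
        rw [hlen']; omega
      rw [hcast,
          ih (t.take (t.length - 3)) (',' :: (t.drop (t.length - 3) ++ rest))
            (by omega) (by omega)]
      conv_rhs => rw [pvComm]
      simp [h4]
    · rw [if_neg (by omega)]
      rw [pvComm]
      simp only [dif_neg h4]

lemma pvBLoop_eq : ∀ (fuel : Nat) (s : List Char) (i : Nat) (acc : List (List Char)),
    i ≤ s.length → i ≤ 3 * fuel →
    pvBChunkLoop fuel s (i : Int) acc = acc ++ pvGrps (s.take i) := by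
  intro fuel
  induction fuel with
  | zero =>
    intro s i acc h1 h2
    have : i = 0 := by omega
    subst this
    rw [pvBChunkLoop, pvGrps]
    simp
  | succ fuel ih =>
    intro s i acc h1 h2
    rw [pvBChunkLoop]
    by_cases hp : 0 < i
    · rw [if_pos (by exact_mod_cast hp)]
      have hto : (s.take i).length = i := by simp [List.length_take]; omega
      have hne : s.take i ≠ [] := by
        intro hnil; rw [← List.length_eq_zero_iff] at hnil; omega
      by_cases h3 : 3 ≤ i
      · have hmax : max 0 ((i : Int) - 3) = ((i - 3 : Nat) : Int) := by omega
        have hstep : (i : Int) - 3 = ((i - 3 : Nat) : Int) := by omega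
        rw [hmax, hstep, PySem.List.slice_natCast,
            ih s (i - 3) _ (by omega) (by omega)]
        conv_rhs => rw [pvGrps]
        simp only [dif_neg hne, hto]
        rw [List.take_take, List.drop_take]
        simp
      · -- i = 1 or 2: the whole prefix is one group and the next index is negative
        have hmax : max 0 ((i : Int) - 3) = ((0 : Nat) : Int) := by omega
        rw [hmax, PySem.List.slice_natCast]
        have hstop : pvBChunkLoop fuel s ((i : Int) - 3)
              (acc ++ [List.take (i - 0) (List.drop 0 s)]) =
            acc ++ [List.take (i - 0) (List.drop 0 s)] := by
          cases fuel with
          | zero => rw [pvBChunkLoop]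
          | succ fuel => rw [pvBChunkLoop]; rw [if_neg (by omega)]
        rw [hstop, pvGrps_small (s.take i) hne (by omega)]
        simp
    · rw [if_neg (by omega)]
      have : i = 0 := by omega
      subst this
      rw [pvGrps]
      simp

lemma pvJoin_concat (gs : List (List Char)) (g : List Char) (h : gs ≠ []) :
    PySem.Chars.join [','] (gs ++ [g]) = PySem.Chars.join [','] gs ++ ',' :: g := by
  induction gs with
  | nil => exact absurd rfl h
  | cons x xs ih =>
    cases xs with
    | nil => simp [PySem.Chars.join, List.intercalate]
    | cons y ys =>
      have hih := ih (by simp)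
      simp only [PySem.Chars.join, List.intercalate] at *
      simp only [List.cons_append, List.intersperse_cons₂, List.flatten_cons] at *
      rw [hih]
      simp

lemma pvJoin_grps (t : List Char) (h : t ≠ []) :
    PySem.Chars.join [','] (pvGrps t).reverse = pvComm t := by
  by_cases h4 : 4 ≤ t.length
  · conv_lhs => rw [pvGrps]
    simp only [dif_neg h]
    rw [List.reverse_cons]
    have hne : t.take (t.length - 3) ≠ [] := by
      intro hnil; rw [← List.length_eq_zero_iff] at hnil
      simp [List.length_take] at hnil; omega
    rw [pvJoin_concat _ _ (by simpa using pvGrps_ne_nil hne)]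
    rw [pvJoin_grps (t.take (t.length - 3)) hne]
    conv_rhs => rw [pvComm]
    simp [h4]
  · rw [pvGrps_small t h (by omega)]
    rw [pvComm]
    simp [PySem.Chars.join, List.intercalate, dif_neg h4]
termination_by t.length
decreasing_by have := List.length_pos_of_ne_nil h; simp; omega

-- the two pipelines agree on EVERY character list
lemma pvKey (s : List Char) : pvAchars s = pvBchars s := by
  unfold pvAchars pvBchars
  simp only [PySem.List.len_eq]
  rw [pvBLoop_eq (s.length + 1) s s.length [] (le_refl _) (by omega), List.take_length,
      List.nil_append]
  by_cases h4 : 4 ≤ s.length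
  · rw [if_pos h4, PySem.List.slice_to_neg_ofNat s 3 (by omega),
        PySem.List.slice_from_neg_ofNat s 3 (by omega)]
    have hlt : (s.take (s.length - 3)).length = s.length - 3 := by
      simp [List.length_take]
    have hld : (s.drop (s.length - 3)).length = 3 := by
      simp [List.length_drop]; omega
    have hlen1 : (s.take (s.length - 3) ++ '_' :: s.drop (s.length - 3)).length = s.length + 1 := by
      simp only [List.length_append, List.length_cons, hlt, hld]; omega
    have hsne : s ≠ [] := by intro hnil; subst hnil; simp at h4
    have htne : s.take (s.length - 3) ≠ [] := by
      intro hnil; rw [← List.length_eq_zero_iff] at hnil; omega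
    have hgne : pvGrps (s.take (s.length - 3)) ≠ [] := pvGrps_ne_nil htne
    -- A side reduces to pvComm (take) ++ '_' :: drop
    have hA : (if 6 < (s.take (s.length - 3) ++ '_' :: s.drop (s.length - 3)).length then
          pvACommaLoop (s.take (s.length - 3) ++ '_' :: s.drop (s.length - 3)).length
            (s.take (s.length - 3) ++ '_' :: s.drop (s.length - 3))
            (((s.take (s.length - 3) ++ '_' :: s.drop (s.length - 3)).length : Int) - 5)
        else s.take (s.length - 3) ++ '_' :: s.drop (s.length - 3)) =
        pvComm (s.take (s.length - 3)) ++ '_' :: s.drop (s.length - 3) := by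
      rw [hlen1]
      by_cases h6 : 6 < s.length + 1
      · rw [if_pos h6]
        have hcast : ((s.length + 1 : Nat) : Int) - 5 =
            (((s.take (s.length - 3)).length : Nat) : Int) - 1 := by
          rw [hlt]; omega
        rw [hcast, pvALoop_eq (s.length + 1) _ _ (by omega) (by omega)]
      · rw [if_neg h6]
        have hc : pvComm (s.take (s.length - 3)) = s.take (s.length - 3) := by
          rw [pvComm]; rw [dif_neg (by omega)]
        rw [hc]
    -- B side reduces to the same value
    have hgrps : pvGrps s = s.drop (s.length - 3) :: pvGrps (s.take (s.length - 3)) := by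
      rw [pvGrps]; simp only [dif_neg hsne]
    have hB : (if (pvGrps s).reverse.length ≤ 1 then s
        else
          PySem.Chars.join [','] (PySem.List.slice (pvGrps s).reverse none (some (-1)))
            ++ '_' :: PySem.List.pyGetD (pvGrps s).reverse (-1) []) =
        pvComm (s.take (s.length - 3)) ++ '_' :: s.drop (s.length - 3) := by
      rw [hgrps, List.reverse_cons]
      have hBne : ¬ ((pvGrps (s.take (s.length - 3))).reverse
          ++ [s.drop (s.length - 3)]).length ≤ 1 := by
        have := List.length_pos_of_ne_nil hgne
        simp only [List.length_append, List.length_reverse, List.length_cons, List.length_nil]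
        omega
      rw [if_neg hBne, PySem.List.slice_to_neg_one, List.dropLast_concat, pvLast,
          pvJoin_grps _ htne]
    rw [hA] at *
    rw [hB]
  · rw [if_neg h4, if_neg (by omega)]
    by_cases hs : s = []
    · subst hs; simp [pvGrps]
    · rw [pvGrps_small s hs (by omega)]
      simp

-- ===== VERDICT (by name: the statement is the Claim_ definition above) =====
theorem add_commas_and_underscore_spec : Claim_equal_add_commas_and_underscore := by
  intro num _
  unfold Spec_add_commas_and_underscore add_commas_and_underscore add_commas_and_underscore_alt
  rw [pvKey]
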